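-- pv_equiv track=rewrite | github.com/karjudev/anonymizer | preprocessing/corpora.py | _add_iob_tagging
-- ===== SOURCE A (Python) =====
-- from typing import Iterable, Iterator, List, Mapping, Set
--
-- def _add_iob_tagging(
--     records: Iterable[Mapping[str, List[str]]], out_label: str = "O"
-- ) -> Iterator[Mapping[str, List[str]]]:
--     for record in records:
--         in_entity = False
--         labels = record["labels"]
--         for i in range(len(labels)):
--             label = labels[i]
--             if label != out_label:
--                 prefix = "I" if in_entity else "B"
--                 labels[i] = f"{prefix}-{label}"
--                 in_entity = True
--             else:
--                 in_entity = False
--         record["labels"] = labels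
--         yield record
-- ===== SOURCE B (Python) =====
-- from itertools import groupby
-- from typing import Iterable, Iterator, List, Mapping
--
-- def _add_iob_tagging(
--     records: Iterable[Mapping[str, List[str]]], out_label: str = "O"
-- ) -> Iterator[Mapping[str, List[str]]]:
--     # Run-based decomposition: group the labels into maximal runs of
--     # out_label / non-out_label; tag each non-O run's head 'B-' and rest 'I-'.
--     for record in records:
--         labels = record["labels"]
--         for is_out, group in groupby(enumerate(labels), key=lambda p: p[1] == out_label):
--             if not is_out:
--                 run = list(group)
--                 i0, first = run[0]
--                 labels[i0] = f"B-{first}"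
--                 for i, lab in run[1:]:
--                     labels[i] = f"I-{lab}"
--         record["labels"] = labels
--         yield record
-- ===== Notes on version B (the rewrite author's own statement) =====
-- stated objective: alternative
-- what changed: A threads an in_entity boolean through an index loop over the labels; B instead groups the labels into maximal runs with itertools.groupby and tags each non-out run's head 'B-' and remaining elements 'I-'; Pre_ excludes records without a 'labels' key (A raises KeyError there) and duplicate-key association lists, which do not encode any Python dict.
import Mathlib
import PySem

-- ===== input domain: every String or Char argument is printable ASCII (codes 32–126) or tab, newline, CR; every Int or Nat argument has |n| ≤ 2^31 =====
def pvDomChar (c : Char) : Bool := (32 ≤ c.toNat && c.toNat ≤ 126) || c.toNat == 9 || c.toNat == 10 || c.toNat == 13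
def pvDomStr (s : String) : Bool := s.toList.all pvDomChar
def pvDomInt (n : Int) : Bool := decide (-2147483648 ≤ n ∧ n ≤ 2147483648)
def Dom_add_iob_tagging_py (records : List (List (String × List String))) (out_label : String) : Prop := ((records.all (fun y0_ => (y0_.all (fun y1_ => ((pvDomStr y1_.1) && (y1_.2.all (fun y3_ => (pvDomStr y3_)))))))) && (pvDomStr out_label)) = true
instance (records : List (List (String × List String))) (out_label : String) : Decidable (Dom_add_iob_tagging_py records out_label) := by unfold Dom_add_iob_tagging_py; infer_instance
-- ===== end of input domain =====

-- B replaces A's index loop that threads an `in_entity` boolean by a run-based (groupby)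
-- decomposition of the label sequence; same cost, different decomposition. Both Pythons
-- mutate each record's 'labels' list in place identically; the theorem is about the
-- returned records.


-- ===== PORT A =====
-- one step of A's 'for i in range(len(labels))' loop; state = (labels, in_entity)
def pvStepA (out_label : String) (st : List String × Bool) (i : Int) : List String × Bool :=
  let label := PySem.List.pyGetD st.1 i ""
  if label ≠ out_label then
    (PySem.List.pySetD st.1 i ((if st.2 then "I" else "B") ++ "-" ++ label), true)
  else
    (st.1, false)

def add_iob_tagging_py (records : List (List (String × List String))) (out_label : String) : List (List (String × List String)) :=
  records.map (fun record =>
    let d := PySem.Dict.mk record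
    let labels := (d.get? "labels").getD []   -- record["labels"]; Pre_ excludes the KeyError (none) case
    let st := (PySem.List.pyRange 0 (labels.length : Int) 1).foldl (pvStepA out_label) (labels, false)
    (d.insert "labels" st.1).items)

-- ===== PORT B =====
-- B's groupby over the labels: a maximal non-out run 'l :: takeWhile (≠ out)' is tagged
-- B- at its head and I- on the rest; out_label entries are kept as they are.
def pvTagRuns (out_label : String) : List String → List String
  | [] => []
  | l :: ls =>
    if l == out_label then
      l :: pvTagRuns out_label ls
    else
      ("B-" ++ l) :: ((ls.takeWhile (fun x => x != out_label)).map (fun x => "I-" ++ x)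
        ++ pvTagRuns out_label (ls.dropWhile (fun x => x != out_label)))
termination_by ls => ls.length
decreasing_by
  · simp
  · have := List.length_dropWhile_le (fun x => x != out_label) ls
    simp; omega

def add_iob_tagging_py_alt (records : List (List (String × List String))) (out_label : String) : List (List (String × List String)) :=
  records.map (fun record =>
    let d := PySem.Dict.mk record
    let labels := (d.get? "labels").getD []
    (d.insert "labels" (pvTagRuns out_label labels)).items)

-- ===== PRECONDITION & SPEC =====
-- Pre_ excludes records without a "labels" key (there the Python raises KeyError) and
-- association lists with a duplicate key, which do not encode any Python dict.
def Pre_add_iob_tagging_py (records : List (List (String × List String))) (out_label : String) : Prop :=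
  ∀ record ∈ records, "labels" ∈ record.map Prod.fst ∧ (record.map Prod.fst).Nodup
instance (records : List (List (String × List String))) (out_label : String) : Decidable (Pre_add_iob_tagging_py records out_label) := by unfold Pre_add_iob_tagging_py; infer_instance

def pvWitness_add_iob_tagging_py : (List (List (String × List String))) × String :=
  ([[("labels", ["PER", "PER", "O", "LOC"])], [("labels", [])]], "O")

def Spec_add_iob_tagging_py (records : List (List (String × List String))) (out_label : String) (out : List (List (String × List String))) : Prop := out = add_iob_tagging_py_alt records out_label
instance (records : List (List (String × List String))) (out_label : String) (out : List (List (String × List String))) : Decidable (Spec_add_iob_tagging_py records out_label out) := by unfold Spec_add_iob_tagging_py; infer_instance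

-- ===== CLAIM (what is proved, stated in full; the proofs are below) =====
def Claim_equal_add_iob_tagging_py : Prop := ∀ (records : List (List (String × List String))) (out_label : String), Dom_add_iob_tagging_py records out_label → Pre_add_iob_tagging_py records out_label → Spec_add_iob_tagging_py records out_label (add_iob_tagging_py records out_label)

-- ===== LEMMAS AND PROOFS =====

-- What A's loop computes on the suffix starting at index done.length with flag b.
def pvTagFrom (out_label : String) (b : Bool) : List String → List String
  | [] => []
  | l :: ls =>
    if l == out_label then l :: pvTagFrom out_label false ls
    else ((if b then "I" else "B") ++ "-" ++ l) :: pvTagFrom out_label true ls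

-- A's in_entity flag after processing a suffix.
def pvFlagAfter (out_label : String) (b : Bool) : List String → Bool
  | [] => b
  | l :: ls => pvFlagAfter out_label (l != out_label) ls

lemma pv_loopA (out_label : String) :
    ∀ (rest done : List String) (b : Bool),
      (PySem.List.pyRange (done.length : Int) ((done.length : Int) + (rest.length : Int)) 1).foldl
        (pvStepA out_label) (done ++ rest, b)
      = (done ++ pvTagFrom out_label b rest, pvFlagAfter out_label b rest) := by
  intro rest
  induction rest with
  | nil =>
    intro done b
    rw [show ((done.length : Int) + (([] : List String).length : Int)) = (done.length : Int) by simp,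
        PySem.List.pyRange_one_eq_nil (le_refl _)]
    simp [pvTagFrom, pvFlagAfter]
  | cons l ls ih =>
    intro done b
    rw [PySem.List.pyRange_one_cons (by simp only [List.length_cons]; push_cast; omega)]
    simp only [List.foldl_cons]
    have hget : PySem.List.pyGetD (done ++ l :: ls) ((done.length : Int)) "" = l := by
      rw [PySem.List.pyGetD_natCast]
      simp [List.getD]
    by_cases h : l = out_label
    · have hstep : pvStepA out_label (done ++ l :: ls, b) (done.length : Int)
          = (done ++ l :: ls, false) := by
        simp [pvStepA, h]
      rw [hstep]
      have hre : (done ++ l :: ls) = (done ++ [l]) ++ ls := by simp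
      have hr : ((done.length : Int) + 1) = (((done ++ [l]).length : Int)) := by simp
      have hr2 : ((done.length : Int) + ((l :: ls).length : Int))
          = (((done ++ [l]).length : Int) + (ls.length : Int)) := by
        simp only [List.length_cons, List.length_append, List.length_nil]
        push_cast; omega
      rw [hre, hr, hr2, ih ((done ++ [l])) false]
      simp [pvTagFrom, pvFlagAfter, h]
    · have hstep : pvStepA out_label (done ++ l :: ls, b) (done.length : Int)
          = (done ++ ((if b then "I" else "B") ++ "-" ++ l) :: ls, true) := by
        simp [pvStepA, hget, h, PySem.List.pySetD_natCast]
      rw [hstep]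
      set v := (if b then "I" else "B") ++ "-" ++ l with hv
      have hre : (done ++ v :: ls) = (done ++ [v]) ++ ls := by simp
      have hr : ((done.length : Int) + 1) = (((done ++ [v]).length : Int)) := by simp
      have hr2 : ((done.length : Int) + ((l :: ls).length : Int))
          = (((done ++ [v]).length : Int) + (ls.length : Int)) := by
        simp only [List.length_cons, List.length_append, List.length_nil]
        push_cast; omega
      rw [hre, hr, hr2, ih ((done ++ [v])) true]
      have hb : (l != out_label) = true := by simp [h]
      simp [pvTagFrom, pvFlagAfter, h, hv, hb]

lemma pv_tagFrom_true (out_label : String) (ls : List String) :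
    pvTagFrom out_label true ls
      = (ls.takeWhile (fun x => x != out_label)).map (fun x => "I-" ++ x)
        ++ pvTagFrom out_label false (ls.dropWhile (fun x => x != out_label)) := by
  induction ls with
  | nil => rfl
  | cons l ls ih =>
    by_cases h : l = out_label
    · simp [pvTagFrom, h]
    · simp [pvTagFrom, h, ih]

lemma pv_tagRuns_eq (out_label : String) (labels : List String) :
    pvTagRuns out_label labels = pvTagFrom out_label false labels := by
  induction hn : labels.length using Nat.strong_induction_on generalizing labels with
  | _ n ih =>
    match labels with
    | [] => simp [pvTagRuns, pvTagFrom]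
    | l :: ls =>
      by_cases h : l = out_label
      · simp only [pvTagRuns, pvTagFrom, h, beq_self_eq_true, if_true]
        exact congrArg _ (ih ls.length (by simp [← hn]) ls rfl)
      · have hb : (l == out_label) = false := by simp [h]
        simp only [pvTagRuns, pvTagFrom, hb, Bool.false_eq_true, if_false]
        rw [pv_tagFrom_true]
        have hd := List.length_dropWhile_le (fun x => x != out_label) ls
        rw [ih (ls.dropWhile (fun x => x != out_label)).length
            (by simp only [List.length_cons] at hn; omega) _ rfl]
        simp

-- ===== VERDICT (by name: the statement is the Claim_ definition above) =====
theorem add_iob_tagging_py_spec : Claim_equal_add_iob_tagging_py := by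
  intro records out_label _ _
  unfold Spec_add_iob_tagging_py add_iob_tagging_py add_iob_tagging_py_alt
  refine List.map_congr_left (fun record _ => ?_)
  have h := pv_loopA out_label ((PySem.Dict.get? (PySem.Dict.mk record) "labels").getD []) [] false
  simp only [List.nil_append, List.length_nil, Nat.cast_zero, zero_add] at h
  simp [h, pv_tagRuns_eq]
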